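-- pv_equiv track=rewrite | github.com/Alpha-su/dbpolicy_crawl | utils.py | is_words_in_string
-- ===== SOURCE A (Python) =====
-- def is_words_in_string(words_set, string):
--     """
--     判断某个字符串中是否包含某个字符集
--     :param words_set: 字符集
--     :param string: 字符串
--     :return: True or False
--     """
--     if not (words_set and string):
--         return False
--     else:
--         for word in words_set:
--             if word in string:
--                 return True
--     return False
-- ===== SOURCE B (Python) =====
-- def is_words_in_string(words_set, string):
--     """Position-major scan: walk the string once and at each index test
--     whether some word starts there (instead of one substring search per word)."""
--     if not words_set or not string:
--         return False
--     for i in range(len(string)):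
--         for word in words_set:
--             if string.startswith(word, i):
--                 return True
--     return False
-- ===== Notes on version B (the rewrite author's own statement) =====
-- stated objective: alternative
-- what changed: A searches the string once per word (word-major, one full substring search each); B makes a single position-major scan of the string, testing at each index whether any word starts there.
import Mathlib
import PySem

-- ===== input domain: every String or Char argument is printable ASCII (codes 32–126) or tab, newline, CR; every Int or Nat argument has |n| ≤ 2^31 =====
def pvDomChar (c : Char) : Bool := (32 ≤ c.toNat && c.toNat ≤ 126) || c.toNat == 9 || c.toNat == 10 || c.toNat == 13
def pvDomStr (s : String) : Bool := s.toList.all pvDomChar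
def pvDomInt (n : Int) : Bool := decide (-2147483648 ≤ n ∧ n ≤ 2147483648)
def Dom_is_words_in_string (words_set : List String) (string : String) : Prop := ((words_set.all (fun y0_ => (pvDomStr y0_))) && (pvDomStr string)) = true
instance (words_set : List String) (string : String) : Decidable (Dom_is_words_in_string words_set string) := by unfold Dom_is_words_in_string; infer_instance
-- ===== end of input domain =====

-- B replaces A's word-major loop (one substring search per word) by a single
-- position-major scan of the string, checking at each index whether some word starts there.

-- ===== PORT A =====
-- the 'for word in words_set: if word in string: return True' loop
def pvLoopA (words_set : List String) (string : String) : Bool :=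
  match words_set with
  | [] => false
  | word :: rest => if PySem.Str.isIn word string then true else pvLoopA rest string

def is_words_in_string (words_set : List String) (string : String) : Bool :=
  if !(words_set ≠ [] && string.toList ≠ []) then false
  else pvLoopA words_set string

-- ===== PORT B =====
-- inner 'for word in words_set: if string.startswith(word, i): return True'
-- string.startswith(word, i) with 0 ≤ i ≤ len(string) is exactly: word is a prefix of string[i:]
def pvInnerB (words_set : List String) (tail : List Char) : Bool :=
  match words_set with
  | [] => false
  | word :: rest => if word.toList.isPrefixOf tail then true else pvInnerB rest tail

-- outer 'for i in range(len(string))'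
def pvOuterB (words_set : List String) (s : List Char) (is : List Nat) : Bool :=
  match is with
  | [] => false
  | i :: rest => if pvInnerB words_set (s.drop i) then true else pvOuterB words_set s rest

def is_words_in_string_alt (words_set : List String) (string : String) : Bool :=
  if words_set = [] ∨ string.toList = [] then false
  else pvOuterB words_set string.toList (List.range string.toList.length)

-- ===== PRECONDITION & SPEC =====
def Spec_is_words_in_string (words_set : List String) (string : String) (out : Bool) : Prop := out = is_words_in_string_alt words_set string
instance (words_set : List String) (string : String) (out : Bool) : Decidable (Spec_is_words_in_string words_set string out) := by unfold Spec_is_words_in_string; infer_instance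

-- ===== CLAIM (what is proved, stated in full; the proofs are below) =====
def Claim_equal_is_words_in_string : Prop := ∀ (words_set : List String) (string : String), Dom_is_words_in_string words_set string → Spec_is_words_in_string words_set string (is_words_in_string words_set string)

-- ===== LEMMAS AND PROOFS =====
theorem pvLoopA_eq_any (ws : List String) (s : String) :
    pvLoopA ws s = ws.any (fun w => PySem.Str.isIn w s) := by
  induction ws with
  | nil => rfl
  | cons w rest ih => simp only [pvLoopA, ih]; cases h : PySem.Str.isIn w s <;> simp_all

theorem pvInnerB_eq_any (ws : List String) (t : List Char) :
    pvInnerB ws t = ws.any (fun w => w.toList.isPrefixOf t) := by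
  induction ws with
  | nil => rfl
  | cons w rest ih => simp only [pvInnerB, ih]; cases h : w.toList.isPrefixOf t <;> simp_all

theorem pvOuterB_eq_any (ws : List String) (s : List Char) (is : List Nat) :
    pvOuterB ws s is = is.any (fun i => pvInnerB ws (s.drop i)) := by
  induction is with
  | nil => rfl
  | cons i rest ih => simp only [pvOuterB, ih]; cases h : pvInnerB ws (List.drop i s) <;> simp [h]

theorem main_eq (ws : List String) (s : String) (_hws : ws ≠ []) (hs : s.toList ≠ []) :
    pvLoopA ws s = pvOuterB ws s.toList (List.range s.toList.length) := by
  rw [pvLoopA_eq_any, pvOuterB_eq_any]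
  rcases Bool.eq_false_or_eq_true (ws.any (fun w => PySem.Str.isIn w s)) with h | h <;> rw [h] <;> symm
  · -- some word occurs: it starts at some index of range(len(string))
    rw [List.any_eq_true] at h ⊢
    obtain ⟨w, hw, hin⟩ := h
    have hin' : PySem.Chars.isIn w.toList s.toList = true := by simpa using hin
    obtain ⟨j, hj⟩ := (PySem.Chars.exists_prefix_drop_iff_isIn w.toList s.toList).mpr hin'
    have hpos : 0 < s.toList.length := List.length_pos_iff.mpr hs
    by_cases hjl : j < s.toList.length
    · refine ⟨j, List.mem_range.mpr hjl, ?_⟩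
      rw [pvInnerB_eq_any, List.any_eq_true]
      exact ⟨w, hw, List.isPrefixOf_iff_prefix.mpr hj⟩
    · -- j past the end: the matched word is empty, so it also starts at index 0
      have hdrop : s.toList.drop j = [] := List.drop_eq_nil_of_le (by omega)
      have hwnil : w.toList = [] := List.prefix_nil.mp (hdrop ▸ hj)
      refine ⟨0, List.mem_range.mpr hpos, ?_⟩
      rw [pvInnerB_eq_any, List.any_eq_true]
      exact ⟨w, hw, List.isPrefixOf_iff_prefix.mpr (by simp [hwnil])⟩
  · -- no word occurs: no position can start one
    rw [List.any_eq_false] at h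
    rw [List.any_eq_false]
    intro i hi
    rw [pvInnerB_eq_any, List.any_eq_true]
    rintro ⟨w, hw, hpre⟩
    have hin : PySem.Chars.isIn w.toList s.toList = true :=
      (PySem.Chars.exists_prefix_drop_iff_isIn w.toList s.toList).mp
        ⟨i, List.isPrefixOf_iff_prefix.mp hpre⟩
    exact h w hw (by simpa using hin)

-- ===== VERDICT (by name: the statement is the Claim_ definition above) =====
theorem is_words_in_string_spec : Claim_equal_is_words_in_string := by
  intro ws s _
  unfold Spec_is_words_in_string is_words_in_string is_words_in_string_alt
  by_cases hws : ws = []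
  · simp [hws]
  · by_cases hs : s.toList = []
    · simp [hws, hs]
    · rw [if_neg (by simp [hws, hs]), if_neg (by simp [hws, hs])]
      exact main_eq ws s hws hs
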